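-- pv_equiv track=rewrite | github.com/AryanPrakhar/ir-chaos | inference/run_inference.py | _dedupe_param_rows
-- ===== SOURCE A (Python) =====
-- def _dedupe_param_rows(param_rows: list[dict[str, str]]) -> list[dict[str, str]]:
--     merged: dict[str, dict[str, str]] = {}
--     for row in param_rows:
--         variable = row.get("variable", "").strip()
--         if not variable:
--             continue
--         existing = merged.get(variable)
--         if not existing:
--             merged[variable] = row
--             continue
--         # Prefer row with a meaningful default/description when duplicates exist.
--         existing_default = (existing.get("default") or "").strip().lower()
--         new_default = (row.get("default") or "").strip().lower()
--         if existing_default in {"", "n/a", "none", '""', "''"} and new_default not in {"", "n/a", "none", '""', "''"}: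
--             merged[variable] = row
--             continue
--         if len((row.get("description") or "").strip()) > len((existing.get("description") or "").strip()):
--             merged[variable] = row
--     return list(merged.values())
-- ===== SOURCE B (Python) =====
-- from functools import reduce
--
-- _EMPTYISH = {"", "n/a", "none", '""', "''"}
--
-- def _better(acc, row):
--     acc_default = (acc.get("default") or "").strip().lower()
--     new_default = (row.get("default") or "").strip().lower()
--     if (acc_default in _EMPTYISH and new_default not in _EMPTYISH) or \
--        len((row.get("description") or "").strip()) > len((acc.get("description") or "").strip()):
--         return row
--     return acc
--
-- def _dedupe_param_rows(param_rows: list[dict[str, str]]) -> list[dict[str, str]]: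
--     groups: dict[str, list[dict[str, str]]] = {}
--     for row in param_rows:
--         variable = row.get("variable", "").strip()
--         if not variable:
--             continue
--         groups.setdefault(variable, []).append(row)
--     return [reduce(_better, rows) for rows in groups.values()]
-- ===== Notes on version B (the rewrite author's own statement) =====
-- stated objective: alternative
-- what changed: A fuses dedup and preference into one merge loop over a variable-keyed dict of winners; B first groups rows by stripped variable into an insertion-ordered dict of lists, then collapses each group with functools.reduce over a single comparator.
import Mathlib
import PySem

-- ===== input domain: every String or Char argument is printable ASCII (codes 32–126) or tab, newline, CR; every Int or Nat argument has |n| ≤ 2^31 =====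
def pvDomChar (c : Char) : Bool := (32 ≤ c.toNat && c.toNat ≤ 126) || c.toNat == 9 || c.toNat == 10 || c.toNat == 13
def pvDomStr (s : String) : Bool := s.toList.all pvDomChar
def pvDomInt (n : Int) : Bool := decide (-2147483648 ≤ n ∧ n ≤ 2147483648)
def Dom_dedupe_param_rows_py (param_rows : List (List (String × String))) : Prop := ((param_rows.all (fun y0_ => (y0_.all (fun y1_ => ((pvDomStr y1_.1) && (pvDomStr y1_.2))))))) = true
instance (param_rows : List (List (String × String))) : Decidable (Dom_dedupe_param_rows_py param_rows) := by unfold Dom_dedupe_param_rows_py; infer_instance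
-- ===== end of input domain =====

-- B separates grouping (variable → list of rows, insertion-ordered) from per-group selection
-- (a left reduce with a single comparator) instead of A's fused merge loop; objective: alternative decomposition, same cost.


-- ===== PORT A =====
-- shared helpers (the same Python expressions occur verbatim in A and in B):
-- row.get(k, "") and (row.get(k) or "") both yield the stored value if present else "" (a stored "" is falsy, `or ""` gives "" again) — exact
def pvRowGet (row : List (String × String)) (k : String) : String :=
  (PySem.Dict.mk row).getD k ""

-- variable = row.get("variable", "").strip()
def pvVar (row : List (String × String)) : String :=
  PySem.Str.strip (pvRowGet row "variable")

-- (x.get("default") or "").strip().lower() in {"", "n/a", "none", '""', "''"}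
def pvEmptyish (row : List (String × String)) : Bool :=
  let t := PySem.Str.lower (PySem.Str.strip (pvRowGet row "default"))
  t == "" || t == "n/a" || t == "none" || t == "\"\"" || t == "''"

-- len((x.get("description") or "").strip())
def pvDescLen (row : List (String × String)) : Int :=
  PySem.Str.len (PySem.Str.strip (pvRowGet row "description"))

-- the body of A's for-loop (merged is the dict `merged`)
def pvStepA (merged : PySem.Dict String (List (String × String))) (row : List (String × String)) :
    PySem.Dict String (List (String × String)) :=
  let var := pvVar row
  if var == "" then merged
  else
    match merged.get? var with
    | none => merged.insert var row
    | some existing =>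
      if existing == ([] : List (String × String)) then merged.insert var row  -- `if not existing` (an empty dict is falsy)
      else if pvEmptyish existing && !pvEmptyish row then merged.insert var row
      else if pvDescLen row > pvDescLen existing then merged.insert var row
      else merged

def dedupe_param_rows_py (param_rows : List (List (String × String))) : List (List (String × String)) :=
  (param_rows.foldl pvStepA PySem.Dict.empty).values

-- ===== PORT B =====
-- _better(acc, row)
def pvBetter (acc row : List (String × String)) : List (String × String) :=
  if (pvEmptyish acc && !pvEmptyish row) = true ∨ pvDescLen row > pvDescLen acc then row else acc

-- the body of B's grouping loop: groups.setdefault(variable, []).append(row)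
def pvStepG (groups : PySem.Dict String (List (List (String × String)))) (row : List (String × String)) :
    PySem.Dict String (List (List (String × String))) :=
  let var := pvVar row
  if var == "" then groups
  else groups.modify var [] (fun rs => rs ++ [row])

-- functools.reduce(_better, rows)  (every group is nonempty; [] is the junk value Python's reduce would raise on)
def pvReduce1 (rows : List (List (String × String))) : List (String × String) :=
  match rows with
  | [] => []
  | h :: t => t.foldl pvBetter h

def dedupe_param_rows_py_alt (param_rows : List (List (String × String))) : List (List (String × String)) :=
  ((param_rows.foldl pvStepG PySem.Dict.empty).values).map pvReduce1

-- ===== PRECONDITION & SPEC =====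
def Spec_dedupe_param_rows_py (param_rows : List (List (String × String))) (out : List (List (String × String))) : Prop := out = dedupe_param_rows_py_alt param_rows
instance (param_rows : List (List (String × String))) (out : List (List (String × String))) : Decidable (Spec_dedupe_param_rows_py param_rows out) := by unfold Spec_dedupe_param_rows_py; infer_instance

-- ===== CLAIM (what is proved, stated in full; the proofs are below) =====
def Claim_equal_dedupe_param_rows_py : Prop := ∀ (param_rows : List (List (String × String))), Dom_dedupe_param_rows_py param_rows → Spec_dedupe_param_rows_py param_rows (dedupe_param_rows_py param_rows)

-- ===== LEMMAS AND PROOFS =====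

-- the reduced dict: B's groups dict with every group collapsed by pvReduce1 (proof-side only)
def pvMred (g : PySem.Dict String (List (List (String × String)))) : PySem.Dict String (List (String × String)) :=
  PySem.Dict.mk (g.items.map (fun p => (p.1, pvReduce1 p.2)))

-- loop invariant of B's grouping dict
def pvInv (g : PySem.Dict String (List (List (String × String)))) : Prop :=
  g.keys.Nodup ∧ ∀ p ∈ g.items, p.2 ≠ [] ∧ ∀ r ∈ p.2, r ≠ ([] : List (String × String))

lemma pvMred_keys (g : PySem.Dict String (List (List (String × String)))) :
    (pvMred g).keys = g.keys := by
  simp [pvMred, PySem.Dict.keys]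

lemma pvMred_get? (g : PySem.Dict String (List (List (String × String)))) (v : String) :
    (pvMred g).get? v = (g.get? v).map pvReduce1 := by
  simp only [pvMred, PySem.Dict.get?, List.find?_map]
  have hpred : ((fun (p : String × List (String × String)) => p.1 == v) ∘
      (fun (p : String × List (List (String × String))) => (p.1, pvReduce1 p.2))) =
      (fun p => p.1 == v) := rfl
  rw [hpred, Option.map_map, Option.map_map]
  rfl

lemma pvMred_contains (g : PySem.Dict String (List (List (String × String)))) (v : String) :
    (pvMred g).contains v = g.contains v := by
  simp [PySem.Dict.contains_eq_isSome_get?, pvMred_get?, Option.isSome_map]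

lemma pvMred_insert (g : PySem.Dict String (List (List (String × String)))) (v : String)
    (w : List (List (String × String))) (h : g.contains v = true) :
    pvMred (g.insert v w) = (pvMred g).insert v (pvReduce1 w) := by
  apply PySem.Dict.ext
  rw [pvMred, PySem.Dict.items_insert_of_contains _ _ h,
      PySem.Dict.items_insert_of_contains _ _ (by rw [pvMred_contains]; exact h)]
  simp only [pvMred, List.map_map]
  apply List.map_congr_left
  intro p _
  by_cases hk : p.1 = v <;> simp [hk]

lemma pvMred_insert_fresh (g : PySem.Dict String (List (List (String × String)))) (v : String)
    (w : List (List (String × String))) (h : g.contains v = false) :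
    pvMred (g.insert v w) = (pvMred g).insert v (pvReduce1 w) := by
  apply PySem.Dict.ext
  rw [pvMred, PySem.Dict.items_insert_of_not_contains _ _ h,
      PySem.Dict.items_insert_of_not_contains _ _ (by rw [pvMred_contains]; exact h)]
  simp [pvMred]

-- inserting the value already stored at a key changes nothing (needs nodup keys)
lemma pvInsert_get_self (d : PySem.Dict String (List (String × String))) (v : String)
    (u : List (String × String)) (hnd : d.keys.Nodup) (h : d.get? v = some u) :
    d.insert v u = d := by
  apply PySem.Dict.ext
  have hc : d.contains v = true := by rw [PySem.Dict.contains_eq_isSome_get?, h]; rfl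
  rw [PySem.Dict.items_insert_of_contains _ _ hc]
  conv_rhs => rw [PySem.Dict.items_eq_map_keys d hnd []]
  rw [PySem.Dict.items_eq_map_keys d hnd [], List.map_map]
  apply List.map_congr_left
  intro k _
  by_cases hk : k = v
  · subst hk
    simp [PySem.Dict.getD_of_get?_eq_some _ _ h]
  · simp [Function.comp, hk]

-- the reduce of a group extended by one row
lemma pvReduce1_append (rs : List (List (String × String))) (row : List (String × String))
    (h : rs ≠ []) : pvReduce1 (rs ++ [row]) = pvBetter (pvReduce1 rs) row := by
  rcases rs with _ | ⟨a, t⟩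
  · exact absurd rfl h
  · simp [pvReduce1, List.foldl_append]

lemma pvReduce1_mem (rs : List (List (String × String))) (h : rs ≠ []) : pvReduce1 rs ∈ rs := by
  rcases rs with _ | ⟨a, t⟩
  · exact absurd rfl h
  · show t.foldl pvBetter a ∈ a :: t
    clear h
    induction t generalizing a with
    | nil => exact List.mem_singleton.mpr rfl
    | cons b t ih =>
      rw [List.foldl_cons]
      rcases List.mem_cons.1 (ih (pvBetter a b)) with h1 | h1
      · rw [h1]
        unfold pvBetter
        split <;> simp
      · exact List.mem_cons_of_mem _ (List.mem_cons_of_mem _ h1)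

lemma pvVar_nil : pvVar ([] : List (String × String)) = "" := rfl

-- one step: A's merge step tracks the reduction of B's grouping step
lemma pvStep_comm (g : PySem.Dict String (List (List (String × String))))
    (row : List (String × String)) (hInv : pvInv g) :
    pvStepA (pvMred g) row = pvMred (pvStepG g row) ∧ pvInv (pvStepG g row) := by
  obtain ⟨hnd, hgr⟩ := hInv
  by_cases hv : pvVar row = ""
  · have hsg : pvStepG g row = g := by simp [pvStepG, hv]
    have hsa : pvStepA (pvMred g) row = pvMred g := by simp [pvStepA, hv]
    rw [hsg, hsa]
    exact ⟨rfl, hnd, hgr⟩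
  · have hv' : (pvVar row == "") = false := by simp [hv]
    have hrow : row ≠ [] := fun h => hv (h ▸ pvVar_nil)
    rcases hg : g.get? (pvVar row) with _ | rs
    · -- fresh variable
      have hc : g.contains (pvVar row) = false := by
        rw [PySem.Dict.contains_eq_isSome_get?, hg]; rfl
      have hsg : pvStepG g row = g.insert (pvVar row) [row] := by
        simp [pvStepG, hv', PySem.Dict.modify, PySem.Dict.getD_of_get?_eq_none _ _ hg]
      constructor
      · rw [hsg, pvMred_insert_fresh _ _ _ hc]
        simp [pvStepA, hv', pvMred_get?, hg, pvReduce1]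
      · constructor
        · rw [hsg, PySem.Dict.keys_insert_of_not_contains _ _ hc]
          refine hnd.append (List.nodup_singleton _) ?_
          intro a ha hb
          rw [List.mem_singleton] at hb
          subst hb
          exact absurd ((PySem.Dict.contains_iff_mem_keys g (pvVar row)).2 ha) (by simp [hc])
        · intro p hp
          rw [hsg] at hp
          rcases (PySem.Dict.mem_items_insert g _ _ p).1 hp with h1 | ⟨h1, _⟩
          · subst h1; exact ⟨by simp, by simpa using hrow⟩
          · exact hgr p h1
    · -- existing group
      have hc : g.contains (pvVar row) = true := by
        rw [PySem.Dict.contains_eq_isSome_get?, hg]; rfl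
      obtain ⟨hne, hmem⟩ := hgr _ (PySem.Dict.mem_items_of_get?_eq_some g hg)
      have hsg : pvStepG g row = g.insert (pvVar row) (rs ++ [row]) := by
        simp [pvStepG, hv', PySem.Dict.modify, PySem.Dict.getD_of_get?_eq_some _ _ hg]
      have hred : pvReduce1 (rs ++ [row]) = pvBetter (pvReduce1 rs) row := pvReduce1_append rs row hne
      have hex : pvReduce1 rs ≠ [] := hmem _ (pvReduce1_mem rs hne)
      have hex' : (pvReduce1 rs == ([] : List (String × String))) = false := by
        simpa using hex
      constructor
      · rw [hsg, pvMred_insert _ _ _ hc, hred]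
        simp only [pvStepA, hv', pvMred_get?, hg, Option.map_some, hex', Bool.false_eq_true,
          if_false, pvBetter]
        by_cases h1 : (pvEmptyish (pvReduce1 rs) && !pvEmptyish row) = true
        · simp [h1]
        · simp only [h1, if_false, Bool.false_eq_true]
          by_cases h2 : pvDescLen row > pvDescLen (pvReduce1 rs)
          · simp [h2]
          · simp only [h2, if_false]
            rw [pvInsert_get_self _ _ _ (by rw [pvMred_keys]; exact hnd)
              (by rw [pvMred_get?, hg]; rfl)]
      · constructor
        · rw [hsg]
          rwa [PySem.Dict.keys_insert_of_contains _ _ hc]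
        · intro p hp
          rw [hsg] at hp
          rcases (PySem.Dict.mem_items_insert g _ _ p).1 hp with h1 | ⟨h1, _⟩
          · subst h1
            refine ⟨by simp, ?_⟩
            intro r hr
            rcases List.mem_append.1 hr with h2 | h2
            · exact hmem r h2
            · simp at h2; subst h2; exact hrow
          · exact hgr p h1

lemma pvLoop (rows : List (List (String × String)))
    (g : PySem.Dict String (List (List (String × String)))) (hInv : pvInv g) :
    rows.foldl pvStepA (pvMred g) = pvMred (rows.foldl pvStepG g) := by
  induction rows generalizing g with
  | nil => rfl
  | cons r t ih =>
    obtain ⟨h1, h2⟩ := pvStep_comm g r hInv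
    simp only [List.foldl, h1]
    exact ih _ h2

-- ===== VERDICT (by name: the statement is the Claim_ definition above) =====
theorem dedupe_param_rows_py_spec : Claim_equal_dedupe_param_rows_py := by
  intro param_rows _
  show dedupe_param_rows_py param_rows = dedupe_param_rows_py_alt param_rows
  unfold dedupe_param_rows_py dedupe_param_rows_py_alt
  have h0 : pvInv PySem.Dict.empty := ⟨PySem.Dict.nodup_keys_empty, by simp [PySem.Dict.empty]⟩
  have : (PySem.Dict.empty : PySem.Dict String (List (String × String))) = pvMred PySem.Dict.empty := rfl
  rw [this, pvLoop _ _ h0]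
  simp [pvMred, PySem.Dict.values, List.map_map]
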